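-- pv_equiv track=rewrite | github.com/shinkansan/2019-UGRP-DPoom | pathplanning/Astar_with_img.py | discost
-- ===== SOURCE A (Python) =====
-- def discost(maze, x, y):
--     """Calculate the distance cost according to neighbor obstacles"""
--     """If the distance(in grid scale) between current node and obstacle is less than 4,
--     the distance cost will be given according to that distance"""
--     distance_cost = 0
--     eight_neighbors = [(0, -1), (0, 1), (-1, 0), (1, 0), (-1, -1), (-1, 1), (1, -1), (1, 1)]
--     for new_position in eight_neighbors:
--         node_position = (x + new_position[0], y + new_position[1])
--         if maze[node_position[0]][node_position[1]] == 1: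
--             distance_cost += 4
--             break
--         else:
--             for new_position2 in eight_neighbors:
--                 node_position2 = (node_position[0] + new_position2[0], node_position[1] + new_position2[1])
--                 if maze[node_position2[0]][node_position2[1]] == 1:
--                     distance_cost += 3
--                     break
--                 else:
--                     for new_position3 in eight_neighbors:
--                         node_position3 = (node_position2[0] + new_position3[0], node_position2[1] + new_position3[1])
--                         if maze[node_position3[0]][node_position3[1]] == 1:
--                             distance_cost += 2
--                             break
--                         else:
--                             for new_position4 in eight_neighbors:
--                                 node_position4 = (node_position3[0] + new_position4[0], node_position3[1] + new_position4[1])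
--                                 if maze[node_position4[0]][node_position4[1]] == 1:
--                                     distance_cost += 1
--     return distance_cost
-- ===== SOURCE B (Python) =====
-- def discost(maze, x, y):
--     """Calculate the distance cost according to neighbor obstacles"""
--     eight_neighbors = [(0, -1), (0, 1), (-1, 0), (1, 0), (-1, -1), (-1, 1), (1, -1), (1, 1)]
--
--     def scan(px, py, depth):
--         total = 0
--         for dx, dy in eight_neighbors:
--             nx, ny = px + dx, py + dy
--             if maze[nx][ny] == 1:
--                 total += 5 - depth
--                 if depth < 4:
--                     break
--             elif depth < 4:
--                 total += scan(nx, ny, depth + 1)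
--         return total
--
--     return scan(x, y, 1)
-- ===== Notes on version B (the rewrite author's own statement) =====
-- stated objective: simpler
-- what changed: Replaces A's four hand-copied nested loops with one recursive helper scan(pos, depth) over the same neighbor order, weighting obstacles 5-depth and recursing/breaking only while depth < 4.
import Mathlib
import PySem

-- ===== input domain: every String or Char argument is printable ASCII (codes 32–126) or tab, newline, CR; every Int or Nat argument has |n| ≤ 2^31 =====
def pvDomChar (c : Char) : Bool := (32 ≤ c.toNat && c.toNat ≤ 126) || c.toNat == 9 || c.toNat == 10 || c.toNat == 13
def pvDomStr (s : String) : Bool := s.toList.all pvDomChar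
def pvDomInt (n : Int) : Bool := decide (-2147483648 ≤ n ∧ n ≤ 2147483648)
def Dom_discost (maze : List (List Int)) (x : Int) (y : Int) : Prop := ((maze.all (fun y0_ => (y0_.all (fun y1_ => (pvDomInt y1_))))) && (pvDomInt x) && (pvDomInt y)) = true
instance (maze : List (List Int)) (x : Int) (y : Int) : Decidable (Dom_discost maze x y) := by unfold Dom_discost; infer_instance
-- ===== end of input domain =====

-- B replaces A's four hand-copied nested loops with ONE recursive helper scan(pos, depth)
-- over the same neighbor order (weight 5-depth; break/recurse only while depth < 4); same cost, simpler code.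


-- ===== PORT A =====
-- maze[i][j] with Python wraparound; none = IndexError
def pvCell (maze : List (List Int)) (i j : Int) : Option Int :=
  match PySem.List.pyGet? maze i with
  | none => none
  | some row => PySem.List.pyGet? row j

def pvEight : List (Int × Int) :=
  [(0, -1), (0, 1), (-1, 0), (1, 0), (-1, -1), (-1, 1), (1, -1), (1, 1)]

-- innermost loop of A: obstacles add 1, no break
def pvLoop4 (maze : List (List Int)) (x3 y3 : Int) : List (Int × Int) → Int → Option Int
  | [], acc => some acc
  | (dx, dy) :: rest, acc =>
    match pvCell maze (x3 + dx) (y3 + dy) with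
    | none => none
    | some v => if v = 1 then pvLoop4 maze x3 y3 rest (acc + 1) else pvLoop4 maze x3 y3 rest acc

def pvLoop3 (maze : List (List Int)) (x2 y2 : Int) : List (Int × Int) → Int → Option Int
  | [], acc => some acc
  | (dx, dy) :: rest, acc =>
    match pvCell maze (x2 + dx) (y2 + dy) with
    | none => none
    | some v =>
      if v = 1 then some (acc + 2)
      else
        match pvLoop4 maze (x2 + dx) (y2 + dy) pvEight acc with
        | none => none
        | some a => pvLoop3 maze x2 y2 rest a

def pvLoop2 (maze : List (List Int)) (x1 y1 : Int) : List (Int × Int) → Int → Option Int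
  | [], acc => some acc
  | (dx, dy) :: rest, acc =>
    match pvCell maze (x1 + dx) (y1 + dy) with
    | none => none
    | some v =>
      if v = 1 then some (acc + 3)
      else
        match pvLoop3 maze (x1 + dx) (y1 + dy) pvEight acc with
        | none => none
        | some a => pvLoop2 maze x1 y1 rest a

def pvLoop1 (maze : List (List Int)) (x y : Int) : List (Int × Int) → Int → Option Int
  | [], acc => some acc
  | (dx, dy) :: rest, acc =>
    match pvCell maze (x + dx) (y + dy) with
    | none => none
    | some v =>
      if v = 1 then some (acc + 4)
      else
        match pvLoop2 maze (x + dx) (y + dy) pvEight acc with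
        | none => none
        | some a => pvLoop1 maze x y rest a

-- outside Pre_discost Python A raises; there the port's .getD 0 value is not claimed
def discost (maze : List (List Int)) (x : Int) (y : Int) : Int :=
  (pvLoop1 maze x y pvEight 0).getD 0

-- ===== PORT B =====
-- scan(pos, depth) from Source B, with fuel f = 5 - depth (weight f; break/recurse only when 1 < f)
def pvScan (maze : List (List Int)) (f : Nat) (px py : Int) (nbrs : List (Int × Int)) (total : Int) : Option Int :=
  match nbrs with
  | [] => some total
  | (dx, dy) :: rest =>
    match pvCell maze (px + dx) (py + dy) with
    | none => none
    | some v =>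
      if v = 1 then
        if 1 < f then some (total + (f : Int))
        else pvScan maze f px py rest (total + (f : Int))
      else if 1 < f then
        match pvScan maze (f - 1) (px + dx) (py + dy) pvEight 0 with
        | none => none
        | some s => pvScan maze f px py rest (total + s)
      else pvScan maze f px py rest total
  termination_by (f, nbrs)
  decreasing_by all_goals simp_all [Prod.lex_iff] <;> omega

def discost_alt (maze : List (List Int)) (x : Int) (y : Int) : Int :=
  (pvScan maze 4 x y pvEight 0).getD 0

-- ===== PRECONDITION & SPEC =====
def pvValidB (maze : List (List Int)) (i j : Int) : Bool := (pvCell maze i j).isSome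
def pvObst (maze : List (List Int)) (i j : Int) : Bool := pvCell maze i j == some 1
-- Pre_ : exactly the inputs on which Python A returns normally, i.e. the radius-4 obstacle scan never
-- indexes out of range. Whether an out-of-range cell is ever touched depends on where an obstacle cuts a
-- level short, so the bound check reads the same window in the same neighbor order (indices only, no cost
-- accumulation): level 4 needs all 8 neighbors indexable; levels 1-3 walk the neighbors until an obstacle,
-- requiring each non-obstacle neighbor's next level to stay in bounds.
def pvInb4 (maze : List (List Int)) (px py : Int) : Bool :=
  pvEight.all (fun n => pvValidB maze (px + n.1) (py + n.2))
def pvInb3 (maze : List (List Int)) (px py : Int) : List (Int × Int) → Bool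
  | [] => true
  | n :: rest =>
    pvValidB maze (px + n.1) (py + n.2) &&
      (pvObst maze (px + n.1) (py + n.2) ||
        (pvInb4 maze (px + n.1) (py + n.2) && pvInb3 maze px py rest))
def pvInb2 (maze : List (List Int)) (px py : Int) : List (Int × Int) → Bool
  | [] => true
  | n :: rest =>
    pvValidB maze (px + n.1) (py + n.2) &&
      (pvObst maze (px + n.1) (py + n.2) ||
        (pvInb3 maze (px + n.1) (py + n.2) pvEight && pvInb2 maze px py rest))
def pvInb1 (maze : List (List Int)) (px py : Int) : List (Int × Int) → Bool
  | [] => true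
  | n :: rest =>
    pvValidB maze (px + n.1) (py + n.2) &&
      (pvObst maze (px + n.1) (py + n.2) ||
        (pvInb2 maze (px + n.1) (py + n.2) pvEight && pvInb1 maze px py rest))
def Pre_discost (maze : List (List Int)) (x : Int) (y : Int) : Prop :=
  pvInb1 maze x y pvEight = true
instance (maze : List (List Int)) (x : Int) (y : Int) : Decidable (Pre_discost maze x y) := by
  unfold Pre_discost; infer_instance

def pvWitness_discost : List (List Int) × Int × Int :=
  ([[0,0,0,0,0,0,0,0,0],[0,0,0,0,0,0,0,0,0],[0,0,0,0,0,0,0,0,0],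
    [0,0,0,0,0,0,0,0,0],[0,0,0,0,1,0,0,0,0],[0,0,0,0,0,0,0,0,0],
    [0,0,0,0,0,0,0,0,0],[0,0,0,0,0,0,0,0,0],[0,0,0,0,0,0,0,0,0]], 4, 4)

def Spec_discost (maze : List (List Int)) (x : Int) (y : Int) (out : Int) : Prop := out = discost_alt maze x y
instance (maze : List (List Int)) (x : Int) (y : Int) (out : Int) : Decidable (Spec_discost maze x y out) := by unfold Spec_discost; infer_instance

-- ===== CLAIM (what is proved, stated in full; the proofs are below) =====
def Claim_equal_discost : Prop := ∀ (maze : List (List Int)) (x : Int) (y : Int), Dom_discost maze x y → Pre_discost maze x y → Spec_discost maze x y (discost maze x y)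

-- ===== LEMMAS AND PROOFS =====

-- accumulator shift for B's scan
theorem pvScan_shift (maze : List (List Int)) (f : Nat) (px py : Int) :
    ∀ (l : List (Int × Int)) (t : Int),
      pvScan maze f px py l t = (pvScan maze f px py l 0).map (fun s => t + s) := by
  intro l
  induction l with
  | nil => intro t; simp [pvScan]
  | cons hd rest ih =>
    intro t
    obtain ⟨dx, dy⟩ := hd
    simp only [pvScan]
    cases pvCell maze (px + dx) (py + dy) with
    | none => rfl
    | some v =>
      simp only
      by_cases hv : v = 1
      · simp only [if_pos hv]
        by_cases hf : 1 < f
        · rw [if_pos hf, if_pos hf]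
          simp only [Option.map_some, Option.some.injEq]; ring
        · rw [if_neg hf, if_neg hf, ih (t + (f : Int)), ih (0 + (f : Int))]
          cases pvScan maze f px py rest 0 with
          | none => rfl
          | some a => simp only [Option.map_some, Option.some.injEq]; ring
      · simp only [if_neg hv]
        by_cases hf : 1 < f
        · rw [if_pos hf, if_pos hf]
          cases pvScan maze (f - 1) (px + dx) (py + dy) pvEight 0 with
          | none => rfl
          | some s =>
            dsimp only
            rw [ih (t + s), ih (0 + s)]
            cases pvScan maze f px py rest 0 with
            | none => rfl
            | some a => simp only [Option.map_some, Option.some.injEq]; ring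
        · rw [if_neg hf, if_neg hf]; exact ih t

theorem pvScan_one_eq_loop4 (maze : List (List Int)) (px py : Int) :
    ∀ (l : List (Int × Int)) (acc : Int),
      pvScan maze 1 px py l acc = pvLoop4 maze px py l acc := by
  intro l
  induction l with
  | nil => intro acc; simp [pvScan, pvLoop4]
  | cons hd rest ih =>
    intro acc
    obtain ⟨dx, dy⟩ := hd
    simp only [pvScan, pvLoop4]
    cases pvCell maze (px + dx) (py + dy) with
    | none => rfl
    | some v =>
      simp only
      by_cases hv : v = 1
      · simp [hv, ih]
      · simp [hv, ih]

theorem pvScan_two_eq_loop3 (maze : List (List Int)) (px py : Int) :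
    ∀ (l : List (Int × Int)) (acc : Int),
      pvScan maze 2 px py l acc = pvLoop3 maze px py l acc := by
  intro l
  induction l with
  | nil => intro acc; simp [pvScan, pvLoop3]
  | cons hd rest ih =>
    intro acc
    obtain ⟨dx, dy⟩ := hd
    simp only [pvScan, pvLoop3]
    cases pvCell maze (px + dx) (py + dy) with
    | none => rfl
    | some v =>
      simp only
      by_cases hv : v = 1
      · norm_num [hv]
      · have h4 : pvLoop4 maze (px + dx) (py + dy) pvEight acc
            = (pvScan maze 1 (px + dx) (py + dy) pvEight 0).map (fun s => acc + s) := by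
          rw [← pvScan_one_eq_loop4, pvScan_shift]
        simp only [if_neg hv, if_pos (by norm_num : (1:ℕ) < 2), h4]
        cases pvScan maze 1 (px + dx) (py + dy) pvEight 0 with
        | none => rfl
        | some s => simp [ih]

theorem pvScan_three_eq_loop2 (maze : List (List Int)) (px py : Int) :
    ∀ (l : List (Int × Int)) (acc : Int),
      pvScan maze 3 px py l acc = pvLoop2 maze px py l acc := by
  intro l
  induction l with
  | nil => intro acc; simp [pvScan, pvLoop2]
  | cons hd rest ih =>
    intro acc
    obtain ⟨dx, dy⟩ := hd
    simp only [pvScan, pvLoop2]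
    cases pvCell maze (px + dx) (py + dy) with
    | none => rfl
    | some v =>
      simp only
      by_cases hv : v = 1
      · norm_num [hv]
      · have h3 : pvLoop3 maze (px + dx) (py + dy) pvEight acc
            = (pvScan maze 2 (px + dx) (py + dy) pvEight 0).map (fun s => acc + s) := by
          rw [← pvScan_two_eq_loop3, pvScan_shift]
        simp only [if_neg hv, if_pos (by norm_num : (1:ℕ) < 3), h3]
        cases pvScan maze 2 (px + dx) (py + dy) pvEight 0 with
        | none => rfl
        | some s => simp [ih]

theorem pvScan_four_eq_loop1 (maze : List (List Int)) (px py : Int) :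
    ∀ (l : List (Int × Int)) (acc : Int),
      pvScan maze 4 px py l acc = pvLoop1 maze px py l acc := by
  intro l
  induction l with
  | nil => intro acc; simp [pvScan, pvLoop1]
  | cons hd rest ih =>
    intro acc
    obtain ⟨dx, dy⟩ := hd
    simp only [pvScan, pvLoop1]
    cases pvCell maze (px + dx) (py + dy) with
    | none => rfl
    | some v =>
      simp only
      by_cases hv : v = 1
      · norm_num [hv]
      · have h2 : pvLoop2 maze (px + dx) (py + dy) pvEight acc
            = (pvScan maze 3 (px + dx) (py + dy) pvEight 0).map (fun s => acc + s) := by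
          rw [← pvScan_three_eq_loop2, pvScan_shift]
        simp only [if_neg hv, if_pos (by norm_num : (1:ℕ) < 4), h2]
        cases pvScan maze 3 (px + dx) (py + dy) pvEight 0 with
        | none => rfl
        | some s => simp [ih]

-- ===== VERDICT (by name: the statement is the Claim_ definition above) =====
theorem discost_spec : Claim_equal_discost := by
  intro maze x y _ _
  unfold Spec_discost discost discost_alt
  rw [pvScan_four_eq_loop1]
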